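-- pv_equiv track=rewrite | github.com/derekrivers/trotters_int_trdaing | src/trotters_trader/active_branch.py | _select_primary_campaign
-- ===== SOURCE A (Python) =====
-- def _select_primary_campaign(primary_director: dict[str, object], campaigns: list[dict[str, object]]) -> dict[str, object]:
--     if not campaigns:
--         return {}
--     current_campaign_id = str(primary_director.get("current_campaign_id") or "").strip()
--     if current_campaign_id:
--         for campaign in campaigns:
--             if str(campaign.get("campaign_id") or "").strip() == current_campaign_id:
--                 return campaign
--     ranked = sorted(
--         campaigns,
--         key=lambda campaign: (
--             1 if str(campaign.get("status", "")).lower() == "running" else 0,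
--             str(campaign.get("updated_at") or ""),
--         ),
--         reverse=True,
--     )
--     return ranked[0]
-- ===== SOURCE B (Python) =====
-- def _select_primary_campaign(primary_director: dict[str, object], campaigns: list[dict[str, object]]) -> dict[str, object]:
--     if not campaigns:
--         return {}
--     current_campaign_id = str(primary_director.get("current_campaign_id") or "").strip()
--     first_id_match = None
--     best = None
--     best_key = None
--     for campaign in campaigns:
--         if (current_campaign_id and first_id_match is None
--                 and str(campaign.get("campaign_id") or "").strip() == current_campaign_id):
--             first_id_match = campaign
--         key = (
--             1 if str(campaign.get("status", "")).lower() == "running" else 0,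
--             str(campaign.get("updated_at") or ""),
--         )
--         if best is None or key > best_key:
--             best, best_key = campaign, key
--     return first_id_match if first_id_match is not None else best
-- ===== Notes on version B (the rewrite author's own statement) =====
-- stated objective: alternative
-- what changed: Replaces the early-return id-scan plus full stable reverse sort with one fused pass that tracks the first id-match and a strict-greater running maximum of the (running-status, updated_at) key.
import Mathlib
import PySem

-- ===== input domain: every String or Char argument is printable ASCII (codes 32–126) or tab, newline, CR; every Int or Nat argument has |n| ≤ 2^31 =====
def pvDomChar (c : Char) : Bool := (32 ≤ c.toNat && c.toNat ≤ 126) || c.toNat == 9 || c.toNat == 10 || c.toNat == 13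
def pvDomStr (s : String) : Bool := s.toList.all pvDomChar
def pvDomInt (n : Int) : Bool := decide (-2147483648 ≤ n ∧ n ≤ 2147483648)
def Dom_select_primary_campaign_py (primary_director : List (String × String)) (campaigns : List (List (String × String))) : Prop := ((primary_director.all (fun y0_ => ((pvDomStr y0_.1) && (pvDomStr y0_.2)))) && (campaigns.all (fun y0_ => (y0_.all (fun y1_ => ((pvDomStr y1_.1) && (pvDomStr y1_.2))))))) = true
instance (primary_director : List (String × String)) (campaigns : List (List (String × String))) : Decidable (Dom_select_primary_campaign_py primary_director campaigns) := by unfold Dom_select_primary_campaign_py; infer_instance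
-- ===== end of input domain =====

-- B fuses A's early-return id-scan and its stable reverse sort into one pass keeping the
-- first id-match and a strict-greater running maximum (objective: alternative, same result).

-- ===== PORT A =====
-- str(campaign.get("campaign_id") or "").strip()  (values are str; str() is identity, '' or "" is "")
def pvKid (c : List (String × String)) : String :=
  PySem.Str.strip (PySem.Dict.getD ⟨c⟩ "campaign_id" "")
-- 1 if str(campaign.get("status", "")).lower() == "running" else 0
def pvKflag (c : List (String × String)) : Nat :=
  if PySem.Str.lower (PySem.Dict.getD ⟨c⟩ "status" "") = "running" then 1 else 0
-- str(campaign.get("updated_at") or "")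
def pvKupd (c : List (String × String)) : String :=
  PySem.Dict.getD ⟨c⟩ "updated_at" ""

def select_primary_campaign_py (primary_director : List (String × String)) (campaigns : List (List (String × String))) : List (String × String) :=
  if campaigns = [] then []
  else
    let current_campaign_id := PySem.Str.strip (PySem.Dict.getD ⟨primary_director⟩ "current_campaign_id" "")
    -- the for-loop with early return is the first-match scan
    match (if current_campaign_id ≠ "" then campaigns.find? (fun c => pvKid c == current_campaign_id) else none) with
    | some c => c
    | none =>
      let ranked := PySem.List.sorted2 campaigns pvKflag pvKupd true
      ranked.headD []   -- ranked[0]; ranked is nonempty by the guard above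

-- ===== PORT B =====
-- one fused pass: state = (first_id_match, best with its cached key)
def pvStep (cid : String)
    (s : Option (List (String × String)) × Option (List (String × String) × Nat × String))
    (c : List (String × String)) :
    Option (List (String × String)) × Option (List (String × String) × Nat × String) :=
  (if cid ≠ "" ∧ s.1 = none ∧ pvKid c = cid then some c else s.1,
   match s.2 with
   | none => some (c, pvKflag c, pvKupd c)
   | some (bc, bk1, bk2) =>
       if bk1 < pvKflag c ∨ (bk1 = pvKflag c ∧ bk2 < pvKupd c)
       then some (c, pvKflag c, pvKupd c) else some (bc, bk1, bk2))

def select_primary_campaign_py_alt (primary_director : List (String × String)) (campaigns : List (List (String × String))) : List (String × String) :=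
  if campaigns = [] then []
  else
    let cid := PySem.Str.strip (PySem.Dict.getD ⟨primary_director⟩ "current_campaign_id" "")
    let st := campaigns.foldl (pvStep cid) (none, none)
    match st.1 with
    | some c => c
    | none =>
      match st.2 with
      | some (bc, _, _) => bc
      | none => []

-- ===== PRECONDITION & SPEC =====
def Spec_select_primary_campaign_py (primary_director : List (String × String)) (campaigns : List (List (String × String))) (out : List (String × String)) : Prop := out = select_primary_campaign_py_alt primary_director campaigns
instance (primary_director : List (String × String)) (campaigns : List (List (String × String))) (out : List (String × String)) : Decidable (Spec_select_primary_campaign_py primary_director campaigns out) := by unfold Spec_select_primary_campaign_py; infer_instance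

-- ===== CLAIM (what is proved, stated in full; the proofs are below) =====
def Claim_equal_select_primary_campaign_py : Prop := ∀ (primary_director : List (String × String)) (campaigns : List (List (String × String))), Dom_select_primary_campaign_py primary_director campaigns → Spec_select_primary_campaign_py primary_director campaigns (select_primary_campaign_py primary_director campaigns)

-- ===== LEMMAS AND PROOFS =====

-- the "before" predicate sorted2 … true uses: x goes before y iff key y < key x (lexicographically)
def pvBefore (x y : List (String × String)) : Bool :=
  decide (pvKflag y < pvKflag x) || !decide (pvKflag x < pvKflag y) && decide (pvKupd y < pvKupd x)

-- B's strict-greater test equals pvBefore (linear orders: ¬(a<b) ∧ ¬(b<a) ↔ a=b)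
theorem pvBefore_iff (x m : List (String × String)) :
    pvBefore x m = true ↔ (pvKflag m < pvKflag x ∨ (pvKflag m = pvKflag x ∧ pvKupd m < pvKupd x)) := by
  simp only [pvBefore, Bool.or_eq_true, Bool.and_eq_true, Bool.not_eq_true', decide_eq_true_iff,
    decide_eq_false_iff_not]
  constructor
  · rintro (h | ⟨h1, h2⟩)
    · exact Or.inl h
    · rcases lt_or_ge (pvKflag m) (pvKflag x) with h' | h'
      · exact Or.inl h'
      · exact Or.inr ⟨by omega, h2⟩
  · rintro (h | ⟨h1, h2⟩)
    · exact Or.inl h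
    · exact Or.inr ⟨by omega, h2⟩

-- head of foldl insertBy = running maximum with pvBefore
theorem head?_foldl_insertBy (before : List (String × String) → List (String × String) → Bool) :
    ∀ (xs : List (List (String × String))) (m : List (String × String)) (t : List (List (String × String))),
    (xs.foldl (fun acc x => PySem.List.insertBy before x acc) (m :: t)).head? =
      some (xs.foldl (fun m x => if before x m then x else m) m) := by
  intro xs
  induction xs with
  | nil => intro m t; rfl
  | cons x xs ih =>
    intro m t
    simp only [List.foldl_cons]
    have hins : PySem.List.insertBy before x (m :: t) =
        if before x m then x :: m :: t else m :: PySem.List.insertBy before x t := rfl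
    rw [hins]
    by_cases h : before x m = true
    · simp only [h, if_true]; exact ih x (m :: t)
    · simp only [h, Bool.false_eq_true, if_false]; exact ih m _

-- the best component of B's fold, started at a consistent cached key, tracks the simple running max
theorem foldl_step_snd (cid : String) :
    ∀ (xs : List (List (String × String))) (mOpt : Option (List (String × String))) (b : List (String × String)),
    (xs.foldl (pvStep cid) (mOpt, some (b, pvKflag b, pvKupd b))).2 =
      some (xs.foldl (fun m x => if pvBefore x m then x else m) b,
            pvKflag (xs.foldl (fun m x => if pvBefore x m then x else m) b),
            pvKupd (xs.foldl (fun m x => if pvBefore x m then x else m) b)) := by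
  intro xs
  induction xs with
  | nil => intro mOpt b; rfl
  | cons x xs ih =>
    intro mOpt b
    simp only [List.foldl_cons]
    have hred : pvStep cid (mOpt, some (b, pvKflag b, pvKupd b)) x =
        ((pvStep cid (mOpt, some (b, pvKflag b, pvKupd b)) x).1,
         if pvKflag b < pvKflag x ∨ (pvKflag b = pvKflag x ∧ pvKupd b < pvKupd x)
         then some (x, pvKflag x, pvKupd x) else some (b, pvKflag b, pvKupd b)) := rfl
    rw [hred]
    by_cases h : pvBefore x b = true
    · rw [if_pos ((pvBefore_iff x b).mp h), ih, if_pos h]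
    · rw [if_neg (fun hc => h ((pvBefore_iff x b).mpr hc)), ih, if_neg h]

theorem pvStep_fst_some (cid : String) (c : List (String × String))
    (b : Option (List (String × String) × Nat × String)) (x : List (String × String)) :
    (pvStep cid (some c, b) x).1 = some c := by
  simp [pvStep]

-- the match component of B's fold, once set, stays set
theorem foldl_step_fst_some (cid : String) :
    ∀ (xs : List (List (String × String))) (c : List (String × String)) (b : Option (List (String × String) × Nat × String)),
    (xs.foldl (pvStep cid) (some c, b)).1 = some c := by
  intro xs
  induction xs with
  | nil => intro c b; rfl
  | cons x xs ih =>
    intro c b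
    simp only [List.foldl_cons]
    rcases hp : pvStep cid (some c, b) x with ⟨p1, p2⟩
    have h := pvStep_fst_some cid c b x
    rw [hp] at h
    simp only at h
    subst h
    exact ih c p2

-- the match component of B's fold from none is A's find? (when cid is nonempty)
theorem foldl_step_fst (cid : String) (hcid : cid ≠ "") :
    ∀ (xs : List (List (String × String))) (b : Option (List (String × String) × Nat × String)),
    (xs.foldl (pvStep cid) (none, b)).1 = xs.find? (fun c => pvKid c == cid) := by
  intro xs
  induction xs with
  | nil => intro b; rfl
  | cons x xs ih =>
    intro b
    simp only [List.foldl_cons, List.find?_cons]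
    by_cases h : pvKid x = cid
    · have hp : (pvStep cid (none, b) x).1 = some x := by simp [pvStep, hcid, h]
      rcases hq : pvStep cid (none, b) x with ⟨p1, p2⟩
      rw [hq] at hp
      simp only at hp
      subst hp
      rw [foldl_step_fst_some]
      have hb : (pvKid x == cid) = true := by simp [h]
      rw [hb]
    · have hp : (pvStep cid (none, b) x).1 = none := by simp [pvStep, h]
      rcases hq : pvStep cid (none, b) x with ⟨p1, p2⟩
      rw [hq] at hp
      simp only at hp
      subst hp
      rw [ih]
      have hb : (pvKid x == cid) = false := by simp [h]
      rw [hb]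

-- the match component is none when cid is empty
theorem foldl_step_fst_empty :
    ∀ (xs : List (List (String × String))) (b : Option (List (String × String) × Nat × String)),
    (xs.foldl (pvStep "") (none, b)).1 = none := by
  intro xs
  induction xs with
  | nil => intro b; rfl
  | cons x xs ih =>
    intro b
    simp only [List.foldl_cons]
    have hp : (pvStep "" (none, b) x).1 = none := by simp [pvStep]
    rcases hq : pvStep "" (none, b) x with ⟨p1, p2⟩
    rw [hq] at hp
    simp only at hp
    subst hp
    exact ih p2

-- sorted2 … true on a nonempty list has the running maximum at its head
theorem sorted2_head (c : List (String × String)) (rest : List (List (String × String))) :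
    (PySem.List.sorted2 (c :: rest) pvKflag pvKupd true).head? =
      some (rest.foldl (fun m x => if pvBefore x m then x else m) c) := by
  have h : PySem.List.sorted2 (c :: rest) pvKflag pvKupd true =
      rest.foldl (fun acc x => PySem.List.insertBy pvBefore x acc) [c] := rfl
  rw [h]
  exact head?_foldl_insertBy pvBefore rest c []

-- the nonempty case, for an arbitrary current_campaign_id
theorem pv_main (cid : String) (c : List (String × String)) (rest : List (List (String × String))) :
    (match (if cid ≠ "" then (c :: rest).find? (fun x => pvKid x == cid) else none) with
     | some w => w
     | none => (PySem.List.sorted2 (c :: rest) pvKflag pvKupd true).headD []) =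
    (match ((c :: rest).foldl (pvStep cid) (none, none)).1 with
     | some w => w
     | none =>
       match ((c :: rest).foldl (pvStep cid) (none, none)).2 with
       | some (bc, _, _) => bc
       | none => []) := by
  have hsnd : ((c :: rest).foldl (pvStep cid) (none, none)).2 =
      some (rest.foldl (fun m x => if pvBefore x m then x else m) c,
            pvKflag (rest.foldl (fun m x => if pvBefore x m then x else m) c),
            pvKupd (rest.foldl (fun m x => if pvBefore x m then x else m) c)) := by
    have h1 : (c :: rest).foldl (pvStep cid) (none, none) =
        rest.foldl (pvStep cid) ((pvStep cid (none, none) c).1, some (c, pvKflag c, pvKupd c)) := by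
      simp only [List.foldl_cons]
      congr 1
    rw [h1, foldl_step_snd]
  have hhead : (PySem.List.sorted2 (c :: rest) pvKflag pvKupd true).headD [] =
      rest.foldl (fun m x => if pvBefore x m then x else m) c := by
    have h := sorted2_head c rest
    cases hs : PySem.List.sorted2 (c :: rest) pvKflag pvKupd true with
    | nil => rw [hs] at h; simp at h
    | cons a t =>
      rw [hs] at h
      simp only [List.head?_cons, Option.some.injEq] at h
      simp [h]
  by_cases hc : cid = ""
  · subst hc
    rw [foldl_step_fst_empty, hsnd]
    simpa using hhead
  · rw [if_pos hc, foldl_step_fst cid hc]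
    cases hf : (c :: rest).find? (fun x => pvKid x == cid) with
    | some w => rfl
    | none => rw [hsnd]; simpa using hhead

-- ===== VERDICT (by name: the statement is the Claim_ definition above) =====
theorem select_primary_campaign_py_spec : Claim_equal_select_primary_campaign_py := by
  intro pd campaigns _
  unfold Spec_select_primary_campaign_py
  by_cases hnil : campaigns = []
  · simp [select_primary_campaign_py, select_primary_campaign_py_alt, hnil]
  · obtain ⟨c, rest, rfl⟩ : ∃ c rest, campaigns = c :: rest := by
      cases campaigns with
      | nil => exact absurd rfl hnil
      | cons c rest => exact ⟨c, rest, rfl⟩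
    simp only [select_primary_campaign_py, select_primary_campaign_py_alt, hnil, if_false]
    exact pv_main _ c rest
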